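-- pv_equiv track=rewrite | github.com/ucsc-hp-group/swift | swift/metadata/server.py | split_attrs_by_scope
-- ===== SOURCE A (Python) =====
-- def split_attrs_by_scope(attrs):
--     """
--     Take the list of attributes and split them by object,container,account,
--     superset, and custom.
--     Reuturns a tuple of attribute strings.
--     """
--     acc_star = []
--     con_star = []
--     obj_star = []
--     all_star = []
--     custom_star = []
--     for attr in attrs.split(','):
--         if attr != "" or attr is not None:
--             if attr.startswith('object_meta') or \
--                     attr.startswith('container_meta') or \
--                     attr.startswith('account_meta'):
--                 custom_star.append(attr)
--             elif attr.startswith('object'):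
--                 obj_star.append(attr)
--             elif attr.startswith('container'):
--                 con_star.append(attr)
--             elif attr.startswith('account'):
--                 acc_star.append(attr)
--             elif attr.startswith('all'):
--                 all_star.append(attr)
--     return (",".join(acc_star), ",".join(con_star), ",".join(obj_star),
--             ",".join(all_star), ",".join(custom_star))
-- ===== SOURCE B (Python) =====
-- def split_attrs_by_scope(attrs):
--     """Simpler: one classify helper with the same ordered checks, then one
--     join-comprehension per bucket instead of a single loop into five lists."""
--     def classify(attr):
--         if attr.startswith('object_meta') or attr.startswith('container_meta') \
--                 or attr.startswith('account_meta'):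
--             return 'custom'
--         if attr.startswith('object'):
--             return 'object'
--         if attr.startswith('container'):
--             return 'container'
--         if attr.startswith('account'):
--             return 'account'
--         if attr.startswith('all'):
--             return 'all'
--         return 'none'
--     toks = attrs.split(',')
--     return (','.join(t for t in toks if classify(t) == 'account'),
--             ','.join(t for t in toks if classify(t) == 'container'),
--             ','.join(t for t in toks if classify(t) == 'object'),
--             ','.join(t for t in toks if classify(t) == 'all'),
--             ','.join(t for t in toks if classify(t) == 'custom'))
-- ===== Notes on version B (the rewrite author's own statement) =====
-- stated objective: simpler
-- what changed: Replaces the single loop appending into five accumulator lists with a small classify helper (same ordered checks) and one independent filter-and-join per bucket.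
import Mathlib
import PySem

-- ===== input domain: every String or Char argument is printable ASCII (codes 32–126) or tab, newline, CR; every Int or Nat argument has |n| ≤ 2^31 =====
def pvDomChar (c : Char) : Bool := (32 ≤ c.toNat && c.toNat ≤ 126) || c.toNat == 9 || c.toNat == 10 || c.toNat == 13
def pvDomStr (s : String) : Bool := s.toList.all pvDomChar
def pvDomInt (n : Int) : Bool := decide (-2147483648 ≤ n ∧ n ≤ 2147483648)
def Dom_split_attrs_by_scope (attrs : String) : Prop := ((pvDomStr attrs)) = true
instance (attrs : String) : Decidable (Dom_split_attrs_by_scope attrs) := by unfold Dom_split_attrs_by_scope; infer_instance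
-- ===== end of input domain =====

-- B is simpler: one classify helper with A's ordered checks, then one filter-and-join per bucket
-- instead of A's single loop appending into five accumulator lists.

-- ===== PORT A =====
-- loop body of A: append attr to the matching bucket (guard `attr != "" or attr is not None` is kept literally)
def pvStepA (st : List String × List String × List String × List String × List String) (attr : String) :
    List String × List String × List String × List String × List String :=
  let (acc, con, obj, al, cus) := st
  if (attr != "") || true then
    if PySem.Str.startswith attr "object_meta" || PySem.Str.startswith attr "container_meta"
        || PySem.Str.startswith attr "account_meta" then
      (acc, con, obj, al, cus ++ [attr])
    else if PySem.Str.startswith attr "object" then (acc, con, obj ++ [attr], al, cus)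
    else if PySem.Str.startswith attr "container" then (acc, con ++ [attr], obj, al, cus)
    else if PySem.Str.startswith attr "account" then (acc ++ [attr], con, obj, al, cus)
    else if PySem.Str.startswith attr "all" then (acc, con, obj, al ++ [attr], cus)
    else (acc, con, obj, al, cus)
  else (acc, con, obj, al, cus)

def split_attrs_by_scope (attrs : String) : String × String × String × String × String :=
  let st := ((PySem.Str.split? attrs ",").getD []).foldl pvStepA ([], [], [], [], [])
  (PySem.Str.join "," st.1, PySem.Str.join "," st.2.1, PySem.Str.join "," st.2.2.1,
   PySem.Str.join "," st.2.2.2.1, PySem.Str.join "," st.2.2.2.2)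

-- ===== PORT B =====
def pvClassify (attr : String) : String :=
  if PySem.Str.startswith attr "object_meta" || PySem.Str.startswith attr "container_meta"
      || PySem.Str.startswith attr "account_meta" then "custom"
  else if PySem.Str.startswith attr "object" then "object"
  else if PySem.Str.startswith attr "container" then "container"
  else if PySem.Str.startswith attr "account" then "account"
  else if PySem.Str.startswith attr "all" then "all"
  else "none"

def split_attrs_by_scope_alt (attrs : String) : String × String × String × String × String :=
  let toks := (PySem.Str.split? attrs ",").getD []
  (PySem.Str.join "," (toks.filter (fun t => pvClassify t == "account")),
   PySem.Str.join "," (toks.filter (fun t => pvClassify t == "container")),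
   PySem.Str.join "," (toks.filter (fun t => pvClassify t == "object")),
   PySem.Str.join "," (toks.filter (fun t => pvClassify t == "all")),
   PySem.Str.join "," (toks.filter (fun t => pvClassify t == "custom")))

-- ===== PRECONDITION & SPEC =====
def Spec_split_attrs_by_scope (attrs : String) (out : String × String × String × String × String) : Prop := out = split_attrs_by_scope_alt attrs
instance (attrs : String) (out : String × String × String × String × String) : Decidable (Spec_split_attrs_by_scope attrs out) := by unfold Spec_split_attrs_by_scope; infer_instance

-- ===== CLAIM (what is proved, stated in full; the proofs are below) =====
def Claim_equal_split_attrs_by_scope : Prop := ∀ (attrs : String), Dom_split_attrs_by_scope attrs → Spec_split_attrs_by_scope attrs (split_attrs_by_scope attrs)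

-- ===== LEMMAS AND PROOFS =====
-- one step of A's loop, expressed through B's classifier
theorem pvStepA_eq (st : List String × List String × List String × List String × List String)
    (t : String) :
    pvStepA st t =
      (st.1 ++ (if pvClassify t == "account" then [t] else []),
       st.2.1 ++ (if pvClassify t == "container" then [t] else []),
       st.2.2.1 ++ (if pvClassify t == "object" then [t] else []),
       st.2.2.2.1 ++ (if pvClassify t == "all" then [t] else []),
       st.2.2.2.2 ++ (if pvClassify t == "custom" then [t] else [])) := by
  rcases st with ⟨a, c, o, l, u⟩
  simp only [pvStepA, pvClassify, Bool.or_true, if_true]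
  split_ifs <;> simp_all

theorem pvFold_eq (ts : List String)
    (acc con obj al cus : List String) :
    ts.foldl pvStepA (acc, con, obj, al, cus) =
      (acc ++ ts.filter (fun t => pvClassify t == "account"),
       con ++ ts.filter (fun t => pvClassify t == "container"),
       obj ++ ts.filter (fun t => pvClassify t == "object"),
       al ++ ts.filter (fun t => pvClassify t == "all"),
       cus ++ ts.filter (fun t => pvClassify t == "custom")) := by
  induction ts generalizing acc con obj al cus with
  | nil => simp
  | cons t ts ih =>
    rw [List.foldl_cons, pvStepA_eq, ih]
    simp only [List.filter_cons]
    by_cases h1 : pvClassify t == "account" <;>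
    by_cases h2 : pvClassify t == "container" <;>
    by_cases h3 : pvClassify t == "object" <;>
    by_cases h4 : pvClassify t == "all" <;>
    by_cases h5 : pvClassify t == "custom" <;>
      simp [h1, h2, h3, h4, h5]

-- ===== VERDICT (by name: the statement is the Claim_ definition above) =====
theorem split_attrs_by_scope_spec : Claim_equal_split_attrs_by_scope := by
  intro attrs _
  unfold Spec_split_attrs_by_scope split_attrs_by_scope split_attrs_by_scope_alt
  rw [pvFold_eq]
  simp
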